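-- pv_equiv track=rewrite | github.com/kiwifruit13/HarnessEngineering | skills/planning-with-files/scripts/validate-rules.py | validate_task_plan
-- ===== SOURCE A (Python) =====
-- from typing import Dict, List, Tuple
--
-- def validate_task_plan(content: str) -> List[Dict]:
--     """Validate task_plan.md structure and content."""
--     issues = []
--
--     if not content:
--         issues.append({
--             "severity": "critical",
--             "category": "missing-file",
--             "message": "task_plan.md does not exist or is empty",
--             "suggestion": "Create task_plan.md using the template or init-session.sh script"
--         })
--         return issues
--
--     lines = content.split('\n')
--
--     # Check for Goal section
--     has_goal = any('## Goal' in line for line in lines)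
--     if not has_goal:
--         issues.append({
--             "severity": "high",
--             "category": "missing-section",
--             "message": "No Goal section found in task_plan.md",
--             "suggestion": "Add ## Goal section with a clear one-sentence description of the end state"
--         })
--
--     # Check for Current Phase
--     has_current_phase = any('## Current Phase' in line for line in lines)
--     if not has_current_phase:
--         issues.append({
--             "severity": "high",
--             "category": "missing-section",
--             "message": "No Current Phase section found in task_plan.md",
--             "suggestion": "Add ## Current Phase section to track which phase you're working on"
--         })
--
--     # Check for Phases section
--     has_phases = any('## Phases' in line for line in lines)
--     if not has_phases:
--         issues.append({
--             "severity": "high",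
--             "category": "missing-section",
--             "message": "No Phases section found in task_plan.md",
--             "suggestion": "Add ## Phases section with 3-7 logical phases"
--         })
--
--     # Check for phase statuses
--     has_status_markers = any('**Status:**' in line for line in lines)
--     if not has_status_markers:
--         issues.append({
--             "severity": "medium",
--             "category": "missing-status",
--             "message": "No phase status markers found",
--             "suggestion": "Add **Status:** to each phase (pending/in_progress/complete)"
--         })
--
--     # Check for Errors section
--     has_errors = any('## Errors Encountered' in line for line in lines)
--     if not has_errors:
--         issues.append({
--             "severity": "low",
--             "category": "best-practice",
--             "message": "No Errors Encountered section found",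
--             "suggestion": "Add ## Errors Encountered section to track and learn from errors"
--         })
--
--     # Check phase count
--     phase_count = sum(1 for line in lines if line.startswith('### Phase'))
--     if phase_count < 3:
--         issues.append({
--             "severity": "medium",
--             "category": "planning",
--             "message": f"Only {phase_count} phases defined (recommended: 3-7)",
--             "suggestion": "Break down the task into 3-7 logical phases"
--         })
--     elif phase_count > 7:
--         issues.append({
--             "severity": "low",
--             "category": "planning",
--             "message": f"Too many phases defined: {phase_count} (recommended: 3-7)",
--             "suggestion": "Consider consolidating related phases"
--         })
--
--     return issues
-- ===== SOURCE B (Python) =====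
-- def validate_task_plan(content):
--     """Single pass over the lines collecting flags and the phase count, then emit issues."""
--     if not content:
--         return [{
--             "severity": "critical",
--             "category": "missing-file",
--             "message": "task_plan.md does not exist or is empty",
--             "suggestion": "Create task_plan.md using the template or init-session.sh script"
--         }]
--
--     has_goal = has_current_phase = has_phases = has_status_markers = has_errors = False
--     phase_count = 0
--     for line in content.split('\n'):
--         has_goal = has_goal or '## Goal' in line
--         has_current_phase = has_current_phase or '## Current Phase' in line
--         has_phases = has_phases or '## Phases' in line
--         has_status_markers = has_status_markers or '**Status:**' in line
--         has_errors = has_errors or '## Errors Encountered' in line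
--         if line.startswith('### Phase'):
--             phase_count += 1
--
--     issues = []
--     if not has_goal:
--         issues.append({
--             "severity": "high",
--             "category": "missing-section",
--             "message": "No Goal section found in task_plan.md",
--             "suggestion": "Add ## Goal section with a clear one-sentence description of the end state"
--         })
--     if not has_current_phase:
--         issues.append({
--             "severity": "high",
--             "category": "missing-section",
--             "message": "No Current Phase section found in task_plan.md",
--             "suggestion": "Add ## Current Phase section to track which phase you're working on"
--         })
--     if not has_phases:
--         issues.append({
--             "severity": "high",
--             "category": "missing-section",
--             "message": "No Phases section found in task_plan.md",
--             "suggestion": "Add ## Phases section with 3-7 logical phases"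
--         })
--     if not has_status_markers:
--         issues.append({
--             "severity": "medium",
--             "category": "missing-status",
--             "message": "No phase status markers found",
--             "suggestion": "Add **Status:** to each phase (pending/in_progress/complete)"
--         })
--     if not has_errors:
--         issues.append({
--             "severity": "low",
--             "category": "best-practice",
--             "message": "No Errors Encountered section found",
--             "suggestion": "Add ## Errors Encountered section to track and learn from errors"
--         })
--     if phase_count < 3:
--         issues.append({
--             "severity": "medium",
--             "category": "planning",
--             "message": f"Only {phase_count} phases defined (recommended: 3-7)",
--             "suggestion": "Break down the task into 3-7 logical phases"
--         })
--     elif phase_count > 7: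
--         issues.append({
--             "severity": "low",
--             "category": "planning",
--             "message": f"Too many phases defined: {phase_count} (recommended: 3-7)",
--             "suggestion": "Consider consolidating related phases"
--         })
--     return issues
-- ===== Notes on version B (the rewrite author's own statement) =====
-- stated objective: alternative
-- what changed: Replaces A's seven independent scans of the line list (six any()/sum generator passes) by one fused loop that maintains five boolean flags and the phase counter, then emits the same issues in the same order.
import Mathlib
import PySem

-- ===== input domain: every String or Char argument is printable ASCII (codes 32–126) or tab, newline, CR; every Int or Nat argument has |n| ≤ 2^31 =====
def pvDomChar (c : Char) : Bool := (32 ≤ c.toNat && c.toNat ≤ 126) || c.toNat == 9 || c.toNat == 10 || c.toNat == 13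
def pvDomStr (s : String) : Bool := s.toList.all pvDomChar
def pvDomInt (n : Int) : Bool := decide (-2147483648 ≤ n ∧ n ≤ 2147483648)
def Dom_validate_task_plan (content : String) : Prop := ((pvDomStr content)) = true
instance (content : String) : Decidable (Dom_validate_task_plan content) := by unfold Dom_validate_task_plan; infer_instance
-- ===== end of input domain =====

-- B changes A by fusing A's seven separate scans of the lines (six any()/sum passes) into one loop over the lines; identical output.

-- issue dict literals (shared text constants; each port assembles them its own way)
def pvIssMissingFile : List (String × String) :=
  [("severity", "critical"), ("category", "missing-file"),
   ("message", "task_plan.md does not exist or is empty"),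
   ("suggestion", "Create task_plan.md using the template or init-session.sh script")]
def pvIssGoal : List (String × String) :=
  [("severity", "high"), ("category", "missing-section"),
   ("message", "No Goal section found in task_plan.md"),
   ("suggestion", "Add ## Goal section with a clear one-sentence description of the end state")]
def pvIssCurrent : List (String × String) :=
  [("severity", "high"), ("category", "missing-section"),
   ("message", "No Current Phase section found in task_plan.md"),
   ("suggestion", "Add ## Current Phase section to track which phase you're working on")]
def pvIssPhases : List (String × String) :=
  [("severity", "high"), ("category", "missing-section"),
   ("message", "No Phases section found in task_plan.md"),
   ("suggestion", "Add ## Phases section with 3-7 logical phases")]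
def pvIssStatus : List (String × String) :=
  [("severity", "medium"), ("category", "missing-status"),
   ("message", "No phase status markers found"),
   ("suggestion", "Add **Status:** to each phase (pending/in_progress/complete)")]
def pvIssErrors : List (String × String) :=
  [("severity", "low"), ("category", "best-practice"),
   ("message", "No Errors Encountered section found"),
   ("suggestion", "Add ## Errors Encountered section to track and learn from errors")]
def pvIssFew (n : Int) : List (String × String) :=
  [("severity", "medium"), ("category", "planning"),
   ("message", "Only " ++ PySem.Int.toStr n ++ " phases defined (recommended: 3-7)"),
   ("suggestion", "Break down the task into 3-7 logical phases")]
def pvIssMany (n : Int) : List (String × String) :=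
  [("severity", "low"), ("category", "planning"),
   ("message", "Too many phases defined: " ++ PySem.Int.toStr n ++ " (recommended: 3-7)"),
   ("suggestion", "Consider consolidating related phases")]

-- ===== PORT A =====
-- A: split once, then six independent passes (any/any/any/any/any + a counting sum), appending after each.
def validate_task_plan (content : String) : List (List (String × String)) :=
  if content = "" then [pvIssMissingFile]
  else
    -- content.split('\n'); the separator is nonempty so split? is always some (getD is only the totality guard)
    let lines := (PySem.Str.split? content "\n").getD []
    let issues : List (List (String × String)) := []
    let has_goal := lines.any (fun line => PySem.Str.isIn "## Goal" line)
    let issues := if !has_goal then issues ++ [pvIssGoal] else issues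
    let has_current_phase := lines.any (fun line => PySem.Str.isIn "## Current Phase" line)
    let issues := if !has_current_phase then issues ++ [pvIssCurrent] else issues
    let has_phases := lines.any (fun line => PySem.Str.isIn "## Phases" line)
    let issues := if !has_phases then issues ++ [pvIssPhases] else issues
    let has_status_markers := lines.any (fun line => PySem.Str.isIn "**Status:**" line)
    let issues := if !has_status_markers then issues ++ [pvIssStatus] else issues
    let has_errors := lines.any (fun line => PySem.Str.isIn "## Errors Encountered" line)
    let issues := if !has_errors then issues ++ [pvIssErrors] else issues
    -- sum(1 for line in lines if line.startswith('### Phase'))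
    let phase_count : Int :=
      lines.foldl (fun acc line => if PySem.Str.startswith line "### Phase" then acc + 1 else acc) 0
    let issues :=
      if phase_count < 3 then issues ++ [pvIssFew phase_count]
      else if phase_count > 7 then issues ++ [pvIssMany phase_count]
      else issues
    issues

-- ===== PORT B =====
-- B: one fold over the lines maintaining (has_goal, has_current_phase, has_phases, has_status_markers, has_errors, phase_count),
-- then the issue list is assembled from the final state.
def pvScanStep (s : Bool × Bool × Bool × Bool × Bool × Int) (line : String) :
    Bool × Bool × Bool × Bool × Bool × Int :=
  (s.1 || PySem.Str.isIn "## Goal" line,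
   s.2.1 || PySem.Str.isIn "## Current Phase" line,
   s.2.2.1 || PySem.Str.isIn "## Phases" line,
   s.2.2.2.1 || PySem.Str.isIn "**Status:**" line,
   s.2.2.2.2.1 || PySem.Str.isIn "## Errors Encountered" line,
   if PySem.Str.startswith line "### Phase" then s.2.2.2.2.2 + 1 else s.2.2.2.2.2)

def validate_task_plan_alt (content : String) : List (List (String × String)) :=
  if content = "" then [pvIssMissingFile]
  else
    let st := ((PySem.Str.split? content "\n").getD []).foldl pvScanStep
      (false, false, false, false, false, (0 : Int))
    (if !st.1 then [pvIssGoal] else []) ++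
    (if !st.2.1 then [pvIssCurrent] else []) ++
    (if !st.2.2.1 then [pvIssPhases] else []) ++
    (if !st.2.2.2.1 then [pvIssStatus] else []) ++
    (if !st.2.2.2.2.1 then [pvIssErrors] else []) ++
    (if st.2.2.2.2.2 < 3 then [pvIssFew st.2.2.2.2.2]
     else if st.2.2.2.2.2 > 7 then [pvIssMany st.2.2.2.2.2] else [])

-- ===== PRECONDITION & SPEC =====
def Spec_validate_task_plan (content : String) (out : List (List (String × String))) : Prop := out = validate_task_plan_alt content
instance (content : String) (out : List (List (String × String))) : Decidable (Spec_validate_task_plan content out) := by unfold Spec_validate_task_plan; infer_instance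

-- ===== CLAIM (what is proved, stated in full; the proofs are below) =====
def Claim_equal_validate_task_plan : Prop := ∀ (content : String), Dom_validate_task_plan content → Spec_validate_task_plan content (validate_task_plan content)

-- ===== LEMMAS AND PROOFS =====

-- B's fused fold computes exactly A's six separate passes.
theorem pvScan_eq (lines : List String) (g c p st e : Bool) (k : Int) :
    lines.foldl pvScanStep (g, c, p, st, e, k) =
      (g || lines.any (fun line => PySem.Str.isIn "## Goal" line),
       c || lines.any (fun line => PySem.Str.isIn "## Current Phase" line),
       p || lines.any (fun line => PySem.Str.isIn "## Phases" line),
       st || lines.any (fun line => PySem.Str.isIn "**Status:**" line),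
       e || lines.any (fun line => PySem.Str.isIn "## Errors Encountered" line),
       lines.foldl (fun acc line => if PySem.Str.startswith line "### Phase" then acc + 1 else acc) k) := by
  induction lines generalizing g c p st e k with
  | nil => simp
  | cons l ls ih =>
      simp only [List.foldl_cons, List.any_cons, pvScanStep]
      rw [ih]
      simp [Bool.or_assoc]

set_option maxHeartbeats 1000000 in
theorem validate_task_plan_spec' (content : String) :
    validate_task_plan content = validate_task_plan_alt content := by
  unfold validate_task_plan validate_task_plan_alt
  by_cases h : content = ""
  · simp [h]
  · simp only [h, if_false]
    rw [pvScan_eq]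
    simp only [Bool.false_or]
    generalize (((PySem.Str.split? content "\n").getD []).any
      (fun line => PySem.Str.isIn "## Goal" line)) = g
    generalize (((PySem.Str.split? content "\n").getD []).any
      (fun line => PySem.Str.isIn "## Current Phase" line)) = c
    generalize (((PySem.Str.split? content "\n").getD []).any
      (fun line => PySem.Str.isIn "## Phases" line)) = p
    generalize (((PySem.Str.split? content "\n").getD []).any
      (fun line => PySem.Str.isIn "**Status:**" line)) = st
    generalize (((PySem.Str.split? content "\n").getD []).any
      (fun line => PySem.Str.isIn "## Errors Encountered" line)) = e
    generalize (((PySem.Str.split? content "\n").getD []).foldl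
      (fun acc line => if PySem.Str.startswith line "### Phase" then acc + 1 else acc) 0) = k
    cases g <;> cases c <;> cases p <;> cases st <;> cases e <;> split_ifs <;> rfl

-- ===== VERDICT (by name: the statement is the Claim_ definition above) =====
theorem validate_task_plan_spec : Claim_equal_validate_task_plan := by
  intro content _
  exact validate_task_plan_spec' content
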